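-- pv_equiv track=rewrite | github.com/demikaiser/AIAbalone | ai_evaluation_function_Pashan.py | analyis
-- ===== SOURCE A (Python) =====
-- def analyis(allies_on_edge, enemeny_on_edge, battles, ally_color):
--     count = 0
--     losing_sumitos = 0
--     enemy_groups_in_danger = 0
--     wining_sumitos = 0
--
--     # look at each battle and get stats
--     for battle in battles:
--         if not battle[1]:
--             if battle[2] == ally_color:
--                 losing_sumitos += 1
--             else:
--                 wining_sumitos += 1
--             for i in range(3, len(battle)):
--                 for ally in allies_on_edge:
--                     if ally == battle[i]:
--                         count += 1
--                 for enemey in enemeny_on_edge: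
--                     if enemey == battle[i]:
--                         enemy_groups_in_danger += 1
--
--
--     return [count, enemy_groups_in_danger,losing_sumitos, wining_sumitos]
-- ===== SOURCE B (Python) =====
-- def analyis(allies_on_edge, enemeny_on_edge, battles, ally_color):
--     counter = {}
--     losing_sumitos = 0
--     wining_sumitos = 0
--     for battle in battles:
--         if not battle[1]:
--             if battle[2] == ally_color:
--                 losing_sumitos += 1
--             else:
--                 wining_sumitos += 1
--             for piece in battle[3:]:
--                 counter[piece] = counter.get(piece, 0) + 1
--     count = sum(counter.get(ally, 0) for ally in allies_on_edge)
--     enemy_groups_in_danger = sum(counter.get(enemey, 0) for enemey in enemeny_on_edge)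
--     return [count, enemy_groups_in_danger, losing_sumitos, wining_sumitos]
-- ===== Notes on version B (the rewrite author's own statement) =====
-- stated objective: alternative
-- what changed: Replaces A's nested per-piece scans of the ally/enemy lists by one counter dict of all edge pieces of qualifying battles, then two independent lookup sums over allies/enemies.
import Mathlib
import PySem

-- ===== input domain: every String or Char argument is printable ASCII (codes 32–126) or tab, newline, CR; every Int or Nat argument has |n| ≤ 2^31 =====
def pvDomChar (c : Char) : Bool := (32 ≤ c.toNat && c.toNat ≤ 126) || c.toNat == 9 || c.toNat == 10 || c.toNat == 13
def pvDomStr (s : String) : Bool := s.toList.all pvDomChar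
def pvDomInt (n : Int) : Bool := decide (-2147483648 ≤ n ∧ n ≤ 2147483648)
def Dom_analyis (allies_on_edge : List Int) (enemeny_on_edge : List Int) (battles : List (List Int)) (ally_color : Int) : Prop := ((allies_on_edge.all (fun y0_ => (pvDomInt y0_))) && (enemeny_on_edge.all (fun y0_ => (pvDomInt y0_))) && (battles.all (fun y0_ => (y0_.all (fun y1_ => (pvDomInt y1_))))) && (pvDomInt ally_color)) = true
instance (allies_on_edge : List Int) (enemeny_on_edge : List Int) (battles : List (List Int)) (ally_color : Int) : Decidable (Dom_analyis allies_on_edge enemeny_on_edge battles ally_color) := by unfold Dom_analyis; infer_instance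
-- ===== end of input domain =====

-- B replaces A's nested per-piece scans of the ally/enemy lists by one counter dict
-- of the edge pieces of qualifying battles, then two independent lookup sums (objective: alternative).

-- ===== PORT A =====
-- state: (count, enemy_groups_in_danger, losing_sumitos, wining_sumitos)
def analyis (allies_on_edge : List Int) (enemeny_on_edge : List Int) (battles : List (List Int)) (ally_color : Int) : List Int :=
  let st := battles.foldl
    (fun (s : Int × Int × Int × Int) battle =>
      let (count, danger, losing, winning) := s
      if PySem.List.pyGetD battle 1 0 == 0 then
        let (losing, winning) :=
          if PySem.List.pyGetD battle 2 0 == ally_color then (losing + 1, winning)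
          else (losing, winning + 1)
        let (count, danger) :=
          (PySem.List.pyRange 3 battle.length 1).foldl
            (fun (cd : Int × Int) i =>
              let c := allies_on_edge.foldl
                (fun c ally => if ally == PySem.List.pyGetD battle i 0 then c + 1 else c) cd.1
              let e := enemeny_on_edge.foldl
                (fun e enemey => if enemey == PySem.List.pyGetD battle i 0 then e + 1 else e) cd.2
              (c, e))
            (count, danger)
        (count, danger, losing, winning)
      else (count, danger, losing, winning))
    (0, 0, 0, 0)
  [st.1, st.2.1, st.2.2.1, st.2.2.2]

-- ===== PORT B =====
-- state: (counter, losing_sumitos, wining_sumitos)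
def analyis_alt (allies_on_edge : List Int) (enemeny_on_edge : List Int) (battles : List (List Int)) (ally_color : Int) : List Int :=
  let st := battles.foldl
    (fun (s : PySem.Dict Int Int × Int × Int) battle =>
      let (counter, losing, winning) := s
      if PySem.List.pyGetD battle 1 0 == 0 then
        let (losing, winning) :=
          if PySem.List.pyGetD battle 2 0 == ally_color then (losing + 1, winning)
          else (losing, winning + 1)
        let counter := (PySem.List.slice battle (some 3) none).foldl
          (fun d piece => d.insert piece (d.getD piece 0 + 1)) counter
        (counter, losing, winning)
      else (counter, losing, winning))
    (PySem.Dict.empty, 0, 0)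
  let count := (allies_on_edge.map (fun ally => st.1.getD ally 0)).sum
  let danger := (enemeny_on_edge.map (fun enemey => st.1.getD enemey 0)).sum
  [count, danger, st.2.1, st.2.2]

-- ===== PRECONDITION & SPEC =====
-- Pre_ excludes exactly the inputs on which A raises IndexError: a battle shorter
-- than 2, or a battle with falsy battle[1] shorter than 3.
def Pre_analyis (allies_on_edge : List Int) (enemeny_on_edge : List Int) (battles : List (List Int)) (ally_color : Int) : Prop :=
  ∀ b ∈ battles, 2 ≤ b.length ∧ (b.getD 1 0 = 0 → 3 ≤ b.length)
instance (allies_on_edge : List Int) (enemeny_on_edge : List Int) (battles : List (List Int)) (ally_color : Int) : Decidable (Pre_analyis allies_on_edge enemeny_on_edge battles ally_color) := by unfold Pre_analyis; infer_instance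
def pvWitness_analyis : List Int × List Int × List (List Int) × Int :=
  ([1], [2], [[0, 0, 5, 1], [0, 1, 3]], 5)
def Spec_analyis (allies_on_edge : List Int) (enemeny_on_edge : List Int) (battles : List (List Int)) (ally_color : Int) (out : List Int) : Prop := out = analyis_alt allies_on_edge enemeny_on_edge battles ally_color
instance (allies_on_edge : List Int) (enemeny_on_edge : List Int) (battles : List (List Int)) (ally_color : Int) (out : List Int) : Decidable (Spec_analyis allies_on_edge enemeny_on_edge battles ally_color out) := by unfold Spec_analyis; infer_instance

-- ===== CLAIM (what is proved, stated in full; the proofs are below) =====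
def Claim_equal_analyis : Prop := ∀ (allies_on_edge : List Int) (enemeny_on_edge : List Int) (battles : List (List Int)) (ally_color : Int), Dom_analyis allies_on_edge enemeny_on_edge battles ally_color → Pre_analyis allies_on_edge enemeny_on_edge battles ally_color → Spec_analyis allies_on_edge enemeny_on_edge battles ally_color (analyis allies_on_edge enemeny_on_edge battles ally_color)

-- ===== LEMMAS AND PROOFS =====

-- the edge pieces of the qualifying battles, in order
def pvPieces (battles : List (List Int)) : List Int :=
  (battles.filter (fun b => PySem.List.pyGetD b 1 0 == 0)).flatMap (fun b => b.drop 3)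

-- mapping battle[i] over range(a, len(battle)) yields drop a
theorem pv_range_map_get (xs : List Int) (a : Nat) :
    (PySem.List.pyRange (a : Int) (xs.length : Int) 1).map (fun i => PySem.List.pyGetD xs i 0) = xs.drop a := by
  induction h : xs.length - a generalizing a with
  | zero =>
      have : ¬ ((a : Int) < (xs.length : Int)) := by omega
      rw [List.drop_eq_nil_of_le (by omega)]
      simp [PySem.List.pyRange, this]
  | succ n ih =>
      have hlt : (a : Int) < (xs.length : Int) := by omega
      have ha : a < xs.length := by omega
      rw [PySem.List.pyRange_one_cons hlt]
      have : ((a : Int) + 1) = ((a + 1 : Nat) : Int) := by push_cast; ring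
      rw [List.map_cons, this, ih (a + 1) (by omega)]
      have hget : PySem.List.pyGetD xs (a : Int) 0 = xs[a] := by
        simp [List.getElem?_eq_getElem ha]
      rw [hget, List.drop_eq_getElem_cons ha]

-- inner ally/enemy fold of A counts occurrences
theorem pv_inner_fold (l : List Int) (v c : Int) :
    l.foldl (fun c x => if x == v then c + 1 else c) c = c + (l.count v : Int) :=
  PySem.List.foldl_beq_add_one l v c

-- A's per-battle double fold, characterized
theorem pv_battle_fold (allies enemies battle : List Int) (c e : Int) :
    (PySem.List.pyRange 3 battle.length 1).foldl
      (fun (cd : Int × Int) i =>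
        let c := allies.foldl (fun c ally => if ally == PySem.List.pyGetD battle i 0 then c + 1 else c) cd.1
        let e := enemies.foldl (fun e x => if x == PySem.List.pyGetD battle i 0 then e + 1 else e) cd.2
        (c, e))
      (c, e)
    = (c + ((battle.drop 3).map (fun p => (allies.count p : Int))).sum,
       e + ((battle.drop 3).map (fun p => (enemies.count p : Int))).sum) := by
  have h3 : (3 : Int) = ((3 : Nat) : Int) := by norm_num
  rw [h3, ← pv_range_map_get battle 3]
  generalize PySem.List.pyRange ((3:Nat) : Int) (battle.length : Int) 1 = idxs
  induction idxs generalizing c e with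
  | nil => simp
  | cons i rest ih =>
      simp only [List.foldl_cons, List.map_cons, List.sum_cons]
      rw [ih]
      rw [pv_inner_fold, pv_inner_fold]
      simp only [Prod.mk.injEq]
      constructor <;> ring

-- double-counting swap: sum over pieces of count-in-l = sum over l of count-in-pieces
theorem pv_swap (l ps : List Int) :
    (ps.map (fun p => (l.count p : Int))).sum = (l.map (fun a => (ps.count a : Int))).sum := by
  induction ps with
  | nil => simp
  | cons p rest ih =>
      simp only [List.map_cons, List.sum_cons, ih]
      have hfun : (l.map (fun a => ((p :: rest).count a : Int)))
           = (l.map (fun a => (if (a == p) = true then (1:Int) else 0) + (rest.count a : Int))) := by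
        apply List.map_congr_left
        intro a _
        by_cases h : a = p
        · simp [List.count_cons, h]; ring
        · simp [List.count_cons, h, Ne.symm h]
      rw [hfun, PySem.List.sum_map_add_int, PySem.List.sum_map_ite_one_zero]
      have : l.countP (fun a => a == p) = l.count p := rfl
      rw [this]

-- B's counter over battles: lookup = count in pvPieces
theorem pv_counter_getD (battles : List (List Int)) (ally_color : Int) (d : PySem.Dict Int Int) (l w : Int) (v : Int) :
    ((battles.foldl
      (fun (s : PySem.Dict Int Int × Int × Int) battle =>
        let (counter, losing, winning) := s
        if PySem.List.pyGetD battle 1 0 == 0 then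
          let (losing, winning) :=
            if PySem.List.pyGetD battle 2 0 == ally_color then (losing + 1, winning)
            else (losing, winning + 1)
          let counter := (PySem.List.slice battle (some 3) none).foldl
            (fun d piece => d.insert piece (d.getD piece 0 + 1)) counter
          (counter, losing, winning)
        else (counter, losing, winning))
      (d, l, w)).1).getD v 0 = d.getD v 0 + ((pvPieces battles).count v : Int) := by
  induction battles generalizing d l w with
  | nil => simp [pvPieces]
  | cons b rest ih =>
      simp only [List.foldl_cons]
      by_cases hb : PySem.List.pyGetD b 1 0 == 0
      · have hslice : PySem.List.slice b (some 3) none = b.drop 3 := by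
          have : (3 : Int) = ((3 : Nat) : Int) := by norm_num
          rw [this, PySem.List.slice_from_natCast]
        by_cases hc : PySem.List.pyGetD b 2 0 == ally_color <;>
          · simp only [hb, hc, if_pos]
            rw [ih]
            rw [hslice, PySem.Dict.getD_foldl_insert_add_one]
            simp [pvPieces, hb, List.count_append]
            ring
      · simp only [hb, ite_false, Bool.false_eq_true]
        rw [ih]
        simp [pvPieces, hb]

-- B's losing/winning tallies agree with A's (generalized over the shared sumito state)
theorem pv_sumito (battles : List (List Int)) (allies enemies : List Int) (ally_color : Int)
    (c e l w : Int) (d : PySem.Dict Int Int) :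
    ((battles.foldl
      (fun (s : Int × Int × Int × Int) battle =>
        let (count, danger, losing, winning) := s
        if PySem.List.pyGetD battle 1 0 == 0 then
          let (losing, winning) :=
            if PySem.List.pyGetD battle 2 0 == ally_color then (losing + 1, winning)
            else (losing, winning + 1)
          let (count, danger) :=
            (PySem.List.pyRange 3 battle.length 1).foldl
              (fun (cd : Int × Int) i =>
                let c := allies.foldl (fun c ally => if ally == PySem.List.pyGetD battle i 0 then c + 1 else c) cd.1
                let e := enemies.foldl (fun e x => if x == PySem.List.pyGetD battle i 0 then e + 1 else e) cd.2
                (c, e))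
              (count, danger)
          (count, danger, losing, winning)
        else (count, danger, losing, winning))
      (c, e, l, w)))
    = (c + ((pvPieces battles).map (fun p => (allies.count p : Int))).sum,
       e + ((pvPieces battles).map (fun p => (enemies.count p : Int))).sum,
       ((battles.foldl
        (fun (s : PySem.Dict Int Int × Int × Int) battle =>
          let (counter, losing, winning) := s
          if PySem.List.pyGetD battle 1 0 == 0 then
            let (losing, winning) :=
              if PySem.List.pyGetD battle 2 0 == ally_color then (losing + 1, winning)
              else (losing, winning + 1)
            let counter := (PySem.List.slice battle (some 3) none).foldl
              (fun d piece => d.insert piece (d.getD piece 0 + 1)) counter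
            (counter, losing, winning)
          else (counter, losing, winning))
        (d, l, w)).2)) := by
  induction battles generalizing c e l w d with
  | nil => simp [pvPieces]
  | cons b rest ih =>
      simp only [List.foldl_cons]
      by_cases hb : PySem.List.pyGetD b 1 0 == 0
      · by_cases hc : PySem.List.pyGetD b 2 0 == ally_color <;>
          · simp only [hb, hc, ite_true]
            rw [pv_battle_fold, ih]
            have hp : pvPieces (b :: rest) = b.drop 3 ++ pvPieces rest := by
              simp [pvPieces, hb]
            rw [hp]
            simp only [List.map_append, List.sum_append, Prod.mk.injEq]
            refine ⟨by ring, by ring, rfl⟩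
      · simp only [hb, ite_false, Bool.false_eq_true]
        rw [ih]
        have hp : pvPieces (b :: rest) = pvPieces rest := by simp [pvPieces, hb]
        rw [hp]

-- ===== VERDICT (by name: the statement is the Claim_ definition above) =====
theorem analyis_spec : Claim_equal_analyis := by
  intro allies enemies battles ally_color _ _
  unfold Spec_analyis analyis analyis_alt
  simp only
  rw [pv_sumito battles allies enemies ally_color 0 0 0 0 PySem.Dict.empty]
  simp only [zero_add]
  congr 1
  · rw [pv_swap]
    apply congrArg; apply List.map_congr_left
    intro a _
    rw [pv_counter_getD]
    simp
  congr 1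
  · rw [pv_swap]
    apply congrArg; apply List.map_congr_left
    intro a _
    rw [pv_counter_getD]
    simp
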